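-- pv_equiv track=rewrite | github.com/pauloavila88/algoz | crawler/algoz_crawler.py | parse_image_link
-- ===== SOURCE A (Python) =====
-- def parse_image_link(link, _image_description='zapcrawler'):
--     _image_width = '614'
--     _image_height = '297'
--     replace_tags = {
--         '{action}': 'crop',
--         '{width}': _image_width,
--         '{height}': _image_height,
--         '{description}': _image_description
--     }
--     out_link = link
--
--     for k, v in replace_tags.items():
--         out_link = out_link.replace(k, v)
--
--     return out_link
-- ===== SOURCE B (Python) =====
-- def parse_image_link(link, _image_description='zapcrawler'):
--     # single left-to-right scan: at each position try the placeholders in order,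
--     # emit the replacement and jump over the tag, instead of four full-string replaces
--     out = []
--     i = 0
--     n = len(link)
--     while i < n:
--         if link.startswith('{action}', i):
--             out.append('crop')
--             i += 8
--         elif link.startswith('{width}', i):
--             out.append('614')
--             i += 7
--         elif link.startswith('{height}', i):
--             out.append('297')
--             i += 8
--         elif link.startswith('{description}', i):
--             out.append(_image_description)
--             i += 13
--         else:
--             out.append(link[i])
--             i += 1
--     return ''.join(out)
-- ===== Notes on version B (the rewrite author's own statement) =====
-- stated objective: alternative
-- what changed: Replaces A's four sequential full-string str.replace passes with one left-to-right scan that matches any of the four placeholders at each position and emits its replacement directly.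
import Mathlib
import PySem

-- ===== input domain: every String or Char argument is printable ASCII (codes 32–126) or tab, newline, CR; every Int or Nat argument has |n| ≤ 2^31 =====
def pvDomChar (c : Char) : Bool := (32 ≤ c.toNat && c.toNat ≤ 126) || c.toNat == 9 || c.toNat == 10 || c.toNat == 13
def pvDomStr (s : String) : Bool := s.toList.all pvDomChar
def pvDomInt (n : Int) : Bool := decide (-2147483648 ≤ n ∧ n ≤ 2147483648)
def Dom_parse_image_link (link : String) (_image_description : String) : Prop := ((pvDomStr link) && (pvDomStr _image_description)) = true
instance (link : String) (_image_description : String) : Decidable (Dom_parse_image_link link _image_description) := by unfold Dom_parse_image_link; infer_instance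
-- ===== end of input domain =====

-- B replaces A's four sequential full-string replace passes by one left-to-right scan
-- that matches any placeholder at each position (objective: alternative single-pass algorithm).

-- ===== PORT A =====
def parse_image_link (link : String) (_image_description : String) : String :=
  let _image_width := "614"
  let _image_height := "297"
  let replace_tags : List (String × String) :=
    [("{action}", "crop"), ("{width}", _image_width),
     ("{height}", _image_height), ("{description}", _image_description)]
  replace_tags.foldl (fun out_link kv => PySem.Str.replace out_link kv.1 kv.2) link

-- ===== PORT B =====
-- the scan loop of Source B: at each position try the placeholders in order, else copy one char
def pyScanTags (desc : List Char) : List Char → List Char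
  | [] => []
  | c :: t =>
    if "{action}".toList.isPrefixOf (c :: t) then
      "crop".toList ++ pyScanTags desc (List.drop 8 (c :: t))
    else if "{width}".toList.isPrefixOf (c :: t) then
      "614".toList ++ pyScanTags desc (List.drop 7 (c :: t))
    else if "{height}".toList.isPrefixOf (c :: t) then
      "297".toList ++ pyScanTags desc (List.drop 8 (c :: t))
    else if "{description}".toList.isPrefixOf (c :: t) then
      desc ++ pyScanTags desc (List.drop 13 (c :: t))
    else
      c :: pyScanTags desc t
  termination_by l => l.length
  decreasing_by all_goals (simp; try omega)

def parse_image_link_alt (link : String) (_image_description : String) : String :=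
  String.ofList (pyScanTags _image_description.toList link.toList)

-- ===== PRECONDITION & SPEC =====
def Spec_parse_image_link (link : String) (_image_description : String) (out : String) : Prop := out = parse_image_link_alt link _image_description
instance (link : String) (_image_description : String) (out : String) : Decidable (Spec_parse_image_link link _image_description out) := by unfold Spec_parse_image_link; infer_instance

-- ===== CLAIM (what is proved, stated in full; the proofs are below) =====
def Claim_equal_parse_image_link : Prop := ∀ (link : String) (_image_description : String), Dom_parse_image_link link _image_description → Spec_parse_image_link link _image_description (parse_image_link link _image_description)

-- ===== LEMMAS AND PROOFS =====

-- the four replace passes of port A, as functions on char lists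
def RA (s : List Char) : List Char := PySem.Chars.replace s "{action}".toList "crop".toList
def RW (s : List Char) : List Char := PySem.Chars.replace s "{width}".toList "614".toList
def RH (s : List Char) : List Char := PySem.Chars.replace s "{height}".toList "297".toList
def RD (desc s : List Char) : List Char := PySem.Chars.replace s "{description}".toList desc

-- accumulator lemma for PySem.Chars.replace.go
lemma go_acc (old new : List Char) : ∀ (fuel : Nat) (l acc : List Char),
    PySem.Chars.replace.go old new fuel l acc
      = acc.reverse ++ PySem.Chars.replace.go old new fuel l [] := by
  intro fuel
  induction fuel with
  | zero => intro l acc; simp [PySem.Chars.replace.go]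
  | succ n ih =>
    intro l acc
    cases l with
    | nil => simp [PySem.Chars.replace.go]
    | cons c t =>
      rw [PySem.Chars.replace.go, PySem.Chars.replace.go]
      by_cases h : old.isPrefixOf (c :: t)
      · simp only [h, if_pos]
        rw [ih _ (new.reverse ++ acc), ih _ (new.reverse ++ [])]
        simp
      · simp only [h, Bool.false_eq_true, if_false]
        rw [ih t (c :: acc), ih t [c]]
        simp

-- fuel irrelevance for go (each step consumes at least one char)
lemma go_fuel (old new : List Char) (hold : old ≠ []) :
    ∀ (f f' : Nat) (l acc : List Char), l.length ≤ f → l.length ≤ f' →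
      PySem.Chars.replace.go old new f l acc = PySem.Chars.replace.go old new f' l acc := by
  intro f
  induction f with
  | zero =>
    intro f' l acc hf hf'
    have : l = [] := by cases l <;> simp_all
    subst this
    cases f' <;> simp [PySem.Chars.replace.go]
  | succ n ih =>
    intro f' l acc hf hf'
    cases l with
    | nil => cases f' <;> simp [PySem.Chars.replace.go]
    | cons c t =>
      cases f' with
      | zero => simp at hf'
      | succ m =>
        rw [PySem.Chars.replace.go, PySem.Chars.replace.go]
        have hol : 1 ≤ old.length := by
          cases old with
          | nil => exact absurd rfl hold
          | cons _ _ => simp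
        by_cases h : old.isPrefixOf (c :: t)
        · simp only [h, if_pos]
          apply ih
          · simp at hf ⊢; omega
          · simp at hf' ⊢; omega
        · simp only [h, Bool.false_eq_true, if_false]
          apply ih
          · simp at hf ⊢; omega
          · simp at hf' ⊢; omega

lemma replace_nil (old new : List Char) (hold : old ≠ []) :
    PySem.Chars.replace [] old new = [] := by
  have hie : old.isEmpty = false := by cases old <;> simp_all
  simp [PySem.Chars.replace, hie, PySem.Chars.replace.go]

lemma replace_cons (old new : List Char) (hold : old ≠ []) (c : Char) (t : List Char) :
    PySem.Chars.replace (c :: t) old new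
      = if old.isPrefixOf (c :: t)
          then new ++ PySem.Chars.replace (List.drop old.length (c :: t)) old new
          else c :: PySem.Chars.replace t old new := by
  have hie : old.isEmpty = false := by cases old <;> simp_all
  have hol : 1 ≤ old.length := by
    cases old with
    | nil => exact absurd rfl hold
    | cons _ _ => simp
  simp only [PySem.Chars.replace, hie, Bool.false_eq_true, if_false, List.length_cons]
  rw [PySem.Chars.replace.go]
  by_cases h : old.isPrefixOf (c :: t)
  · simp only [h, if_pos]
    rw [go_acc]
    have hlen : (List.drop old.length (c :: t)).length ≤ t.length := by simp; omega
    rw [go_fuel old new hold t.length (List.drop old.length (c :: t)).length _ [] hlen le_rfl]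
    simp
  · simp only [h, Bool.false_eq_true, if_false]
    rw [go_acc]
    simp

-- consume: the pattern at the front is replaced and the scan continues after it
lemma replace_consume (old new s : List Char) (hold : old ≠ []) (h : old <+: s) :
    PySem.Chars.replace s old new = new ++ PySem.Chars.replace (List.drop old.length s) old new := by
  obtain ⟨r, rfl⟩ := h
  have hd : List.drop old.length (old ++ r) = r := List.drop_left
  rw [hd]
  cases old with
  | nil => exact absurd rfl hold
  | cons oc otl =>
    rw [List.cons_append, replace_cons _ _ hold]
    have hp : (oc :: otl).isPrefixOf (oc :: (otl ++ r)) = true := by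
      rw [List.isPrefixOf_iff_prefix, ← List.cons_append]
      exact List.prefix_append _ _
    rw [if_pos hp]
    simp [List.drop_left']

-- skip: no pattern at the front, the first char is copied
lemma replace_skip (old new : List Char) (hold : old ≠ []) (c : Char) (t : List Char)
    (h : ¬ old <+: (c :: t)) :
    PySem.Chars.replace (c :: t) old new = c :: PySem.Chars.replace t old new := by
  rw [replace_cons old new hold c t, if_neg]
  rw [List.isPrefixOf_iff_prefix]
  exact h

-- a block containing no occurrence of the pattern's first char is copied verbatim
lemma replace_pass (oc : Char) (otl new : List Char) :
    ∀ (b s : List Char), (∀ c ∈ b, c ≠ oc) →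
      PySem.Chars.replace (b ++ s) (oc :: otl) new = b ++ PySem.Chars.replace s (oc :: otl) new := by
  intro b
  induction b with
  | nil => intro s _; simp
  | cons d b ih =>
    intro s hb
    rw [List.cons_append, replace_skip _ _ (by simp) d (b ++ s)
      (fun hp => (hb d (by simp)) (List.cons_prefix_cons.mp hp).1.symm)]
    rw [ih s (fun c hc => hb c (by simp [hc]))]
    simp

lemma prefix_append_cases {u a x : List Char} (h : u <+: a ++ x) : u <+: a ∨ a <+: u := by
  induction a generalizing u with
  | nil => right; exact List.nil_prefix
  | cons b a ih =>
    cases u with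
    | nil => left; exact List.nil_prefix
    | cons d u =>
      rw [List.cons_append] at h
      obtain ⟨rfl, h2⟩ := List.cons_prefix_cons.mp h
      rcases ih h2 with h3 | h3
      · left; exact List.cons_prefix_cons.mpr ⟨rfl, h3⟩
      · right; exact List.cons_prefix_cons.mpr ⟨rfl, h3⟩

-- replacing cannot create a new front occurrence of a suffix of T,
-- provided new is incomparable with every nonempty suffix of T
lemma no_create (old new T : List Char) (hold : old ≠ [])
    (hT : ∀ k, k < T.length → ¬ (List.drop k T <+: new) ∧ ¬ (new <+: List.drop k T)) :
    ∀ (n : Nat) (s : List Char), s.length ≤ n → ∀ (k : Nat), k < T.length → ¬ List.drop k T <+: s →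
      ¬ List.drop k T <+: PySem.Chars.replace s old new := by
  intro n
  induction n with
  | zero =>
    intro s hs k hk hns
    have : s = [] := by cases s <;> simp_all
    subst this
    rw [replace_nil old new hold]
    intro hp
    have : List.drop k T = [] := List.prefix_nil.mp hp
    have : T.length - k = 0 := by simpa using congrArg List.length this
    omega
  | succ n ih =>
    intro s hs k hk hns
    cases s with
    | nil =>
      rw [replace_nil old new hold]
      intro hp
      have : List.drop k T = [] := List.prefix_nil.mp hp
      have : T.length - k = 0 := by simpa using congrArg List.length this
      omega
    | cons c t =>
      by_cases hp : old <+: (c :: t)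
      · rw [replace_consume old new _ hold hp]
        intro hpre
        rcases prefix_append_cases hpre with h1 | h1
        · exact (hT k hk).1 h1
        · exact (hT k hk).2 h1
      · rw [replace_skip old new hold c t hp]
        intro hpre
        have hkT : List.drop k T = T[k] :: List.drop (k + 1) T := List.drop_eq_getElem_cons hk
        rw [hkT] at hpre hns
        obtain ⟨h1, h2⟩ := List.cons_prefix_cons.mp hpre
        by_cases hend : k + 1 < T.length
        · have hnt : ¬ List.drop (k + 1) T <+: t :=
            fun hq => hns (List.cons_prefix_cons.mpr ⟨h1, hq⟩)
          exact ih t (by simp at hs; omega) (k + 1) hend hnt h2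
        · have hnil : List.drop (k + 1) T = [] := List.drop_eq_nil_of_le (by omega)
          rw [hnil] at hns
          exact hns (by rw [h1]; exact List.cons_prefix_cons.mpr ⟨rfl, List.nil_prefix⟩)

-- the tag literals in head-tail form
lemma eA : "{action}".toList = '{' :: "action}".toList := by decide
lemma eW : "{width}".toList = '{' :: "width}".toList := by decide
lemma eH : "{height}".toList = '{' :: "height}".toList := by decide
lemma eD : "{description}".toList = '{' :: "description}".toList := by decide

-- shape-parameterised corollaries, convenient for the concrete tags
lemma replace_pass' (old new : List Char) (oc : Char) (otl : List Char) (hsh : old = oc :: otl)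
    (b s : List Char) (hb : ∀ c ∈ b, c ≠ oc) :
    PySem.Chars.replace (b ++ s) old new = b ++ PySem.Chars.replace s old new := by
  subst hsh; exact replace_pass oc otl new b s hb

lemma pass_tag (old new : List Char) (oc : Char) (otl : List Char) (hsh : old = oc :: otl)
    (tb : Char) (tt s : List Char) (htt : ∀ c ∈ tt, c ≠ oc)
    (h0 : ¬ old <+: ((tb :: tt) ++ s)) :
    PySem.Chars.replace ((tb :: tt) ++ s) old new = (tb :: tt) ++ PySem.Chars.replace s old new := by
  subst hsh
  rw [List.cons_append, replace_skip _ _ (by simp) _ _ (by rw [← List.cons_append]; exact h0)]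
  rw [replace_pass oc otl new tt s htt]
  simp

lemma not_prefix_of_incomp {u a : List Char} (x : List Char) (h1 : ¬ u <+: a) (h2 : ¬ a <+: u) :
    ¬ u <+: a ++ x :=
  fun hp => (prefix_append_cases hp).elim h1 h2

-- no new front occurrence of the tag (oc :: otl) appears after replacing inside the tail
lemma not_prefix_cons_replace (old new : List Char) (hold : old ≠ []) (oc : Char) (otl : List Char)
    (hmis : ∀ k, k < otl.length + 1 → ¬ (List.drop k (oc :: otl) <+: new) ∧ ¬ (new <+: List.drop k (oc :: otl)))
    (c : Char) (t : List Char) (h : ¬ (oc :: otl) <+: (c :: t)) :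
    ¬ (oc :: otl) <+: (c :: PySem.Chars.replace t old new) := by
  intro hp
  obtain ⟨h1, h2⟩ := List.cons_prefix_cons.mp hp
  cases otl with
  | nil => exact h (by rw [h1]; exact List.cons_prefix_cons.mpr ⟨rfl, List.nil_prefix⟩)
  | cons d dt =>
    have hno : ¬ List.drop 1 (oc :: d :: dt) <+: t := by
      simpa using fun hq => h (List.cons_prefix_cons.mpr ⟨h1, hq⟩)
    have := no_create old new (oc :: d :: dt) hold (by simpa using hmis)
      t.length t le_rfl 1 (by simp) hno
    simp at this
    exact this h2

lemma isPrefixOf_false {l l' : List Char} (h : ¬ l <+: l') : l.isPrefixOf l' = false := by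
  rw [← Bool.not_eq_true, List.isPrefixOf_iff_prefix]
  exact h

lemma tagCond_false (tag b x : List Char) (h1 : ¬ tag <+: b) (h2 : ¬ b <+: tag) :
    tag.isPrefixOf (b ++ x) = false :=
  isPrefixOf_false (not_prefix_of_incomp x h1 h2)

lemma tagCond_true (tag x : List Char) : tag.isPrefixOf (tag ++ x) = true := by
  rw [List.isPrefixOf_iff_prefix]; exact List.prefix_append _ _

lemma pyScan_nil (desc : List Char) : pyScanTags desc [] = [] := by
  simp [pyScanTags]

lemma pyScan_cons (desc : List Char) (c : Char) (t : List Char) :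
    pyScanTags desc (c :: t)
      = if "{action}".toList.isPrefixOf (c :: t) then
          "crop".toList ++ pyScanTags desc (List.drop 8 (c :: t))
        else if "{width}".toList.isPrefixOf (c :: t) then
          "614".toList ++ pyScanTags desc (List.drop 7 (c :: t))
        else if "{height}".toList.isPrefixOf (c :: t) then
          "297".toList ++ pyScanTags desc (List.drop 8 (c :: t))
        else if "{description}".toList.isPrefixOf (c :: t) then
          desc ++ pyScanTags desc (List.drop 13 (c :: t))
        else
          c :: pyScanTags desc t := by
  rw [pyScanTags]

lemma pyScan_action (desc rest : List Char) :
    pyScanTags desc ("{action}".toList ++ rest) = "crop".toList ++ pyScanTags desc rest := by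
  have hsh : ("{action}".toList ++ rest) = '{' :: ("action}".toList ++ rest) := by rw [eA, List.cons_append]
  rw [hsh, pyScan_cons, ← List.cons_append, ← eA]
  rw [tagCond_true "{action}".toList rest]
  simp only [if_true]
  rw [List.drop_left' (by decide)]

lemma pyScan_width (desc rest : List Char) :
    pyScanTags desc ("{width}".toList ++ rest) = "614".toList ++ pyScanTags desc rest := by
  have hsh : ("{width}".toList ++ rest) = '{' :: ("width}".toList ++ rest) := by rw [eW, List.cons_append]
  rw [hsh, pyScan_cons, ← List.cons_append, ← eW]
  rw [tagCond_false "{action}".toList "{width}".toList rest (by decide) (by decide)]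
  rw [tagCond_true "{width}".toList rest]
  simp only [Bool.false_eq_true, if_false, if_true]
  rw [List.drop_left' (by decide)]

lemma pyScan_height (desc rest : List Char) :
    pyScanTags desc ("{height}".toList ++ rest) = "297".toList ++ pyScanTags desc rest := by
  have hsh : ("{height}".toList ++ rest) = '{' :: ("height}".toList ++ rest) := by rw [eH, List.cons_append]
  rw [hsh, pyScan_cons, ← List.cons_append, ← eH]
  rw [tagCond_false "{action}".toList "{height}".toList rest (by decide) (by decide)]
  rw [tagCond_false "{width}".toList "{height}".toList rest (by decide) (by decide)]
  rw [tagCond_true "{height}".toList rest]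
  simp only [Bool.false_eq_true, if_false, if_true]
  rw [List.drop_left' (by decide)]

lemma pyScan_description (desc rest : List Char) :
    pyScanTags desc ("{description}".toList ++ rest) = desc ++ pyScanTags desc rest := by
  have hsh : ("{description}".toList ++ rest) = '{' :: ("description}".toList ++ rest) := by rw [eD, List.cons_append]
  rw [hsh, pyScan_cons, ← List.cons_append, ← eD]
  rw [tagCond_false "{action}".toList "{description}".toList rest (by decide) (by decide)]
  rw [tagCond_false "{width}".toList "{description}".toList rest (by decide) (by decide)]
  rw [tagCond_false "{height}".toList "{description}".toList rest (by decide) (by decide)]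
  rw [tagCond_true "{description}".toList rest]
  simp only [Bool.false_eq_true, if_false, if_true]
  rw [List.drop_left' (by decide)]

lemma misWA : ∀ k, k < ("width}".toList).length + 1 →
    ¬ (List.drop k ('{' :: "width}".toList) <+: "crop".toList) ∧ ¬ ("crop".toList <+: List.drop k ('{' :: "width}".toList)) := by
  intro k hk
  have hlen : ("width}".toList).length = 6 := by decide
  rw [hlen] at hk
  interval_cases k <;> exact ⟨by decide, by decide⟩

lemma misHA : ∀ k, k < ("height}".toList).length + 1 →
    ¬ (List.drop k ('{' :: "height}".toList) <+: "crop".toList) ∧ ¬ ("crop".toList <+: List.drop k ('{' :: "height}".toList)) := by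
  intro k hk
  have hlen : ("height}".toList).length = 7 := by decide
  rw [hlen] at hk
  interval_cases k <;> exact ⟨by decide, by decide⟩

lemma misHW : ∀ k, k < ("height}".toList).length + 1 →
    ¬ (List.drop k ('{' :: "height}".toList) <+: "614".toList) ∧ ¬ ("614".toList <+: List.drop k ('{' :: "height}".toList)) := by
  intro k hk
  have hlen : ("height}".toList).length = 7 := by decide
  rw [hlen] at hk
  interval_cases k <;> exact ⟨by decide, by decide⟩

lemma misDA : ∀ k, k < ("description}".toList).length + 1 →
    ¬ (List.drop k ('{' :: "description}".toList) <+: "crop".toList) ∧ ¬ ("crop".toList <+: List.drop k ('{' :: "description}".toList)) := by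
  intro k hk
  have hlen : ("description}".toList).length = 12 := by decide
  rw [hlen] at hk
  interval_cases k <;> exact ⟨by decide, by decide⟩

lemma misDW : ∀ k, k < ("description}".toList).length + 1 →
    ¬ (List.drop k ('{' :: "description}".toList) <+: "614".toList) ∧ ¬ ("614".toList <+: List.drop k ('{' :: "description}".toList)) := by
  intro k hk
  have hlen : ("description}".toList).length = 12 := by decide
  rw [hlen] at hk
  interval_cases k <;> exact ⟨by decide, by decide⟩

lemma misDH : ∀ k, k < ("description}".toList).length + 1 →
    ¬ (List.drop k ('{' :: "description}".toList) <+: "297".toList) ∧ ¬ ("297".toList <+: List.drop k ('{' :: "description}".toList)) := by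
  intro k hk
  have hlen : ("description}".toList).length = 12 := by decide
  rw [hlen] at hk
  interval_cases k <;> exact ⟨by decide, by decide⟩

-- the main induction: the four sequential replaces equal the single scan
lemma chain_eq_scan (desc : List Char) :
    ∀ (n : Nat) (l : List Char), l.length ≤ n →
      RD desc (RH (RW (RA l))) = pyScanTags desc l := by
  intro n
  induction n with
  | zero =>
    intro l hl
    have : l = [] := by cases l <;> simp_all
    subst this
    simp only [RA, RW, RH, RD]
    rw [replace_nil _ _ (by decide), replace_nil _ _ (by decide),
      replace_nil _ _ (by decide), replace_nil _ _ (by decide), pyScan_nil]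
  | succ n ih =>
    intro l hl
    cases l with
    | nil =>
      simp only [RA, RW, RH, RD]
      rw [replace_nil _ _ (by decide), replace_nil _ _ (by decide),
        replace_nil _ _ (by decide), replace_nil _ _ (by decide), pyScan_nil]
    | cons c t =>
      have hlt : t.length ≤ n := by simp at hl; omega
      by_cases h1 : "{action}".toList <+: (c :: t)
      · obtain ⟨rest, hrest⟩ := h1
        have hrl : rest.length ≤ n := by
          have := congrArg List.length hrest; simp at this; omega
        rw [← hrest]
        have e1 : RA ("{action}".toList ++ rest) = "crop".toList ++ RA (rest) := by
          simp only [RA]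
          rw [replace_consume "{action}".toList "crop".toList ("{action}".toList ++ rest) (by decide) (List.prefix_append _ _), List.drop_left]
        have e2 : RW ("crop".toList ++ RA (rest)) = "crop".toList ++ RW (RA (rest)) := by
          simp only [RW]
          exact replace_pass' "{width}".toList "614".toList '{' "width}".toList eW "crop".toList (RA (rest)) (by simp)
        have e3 : RH ("crop".toList ++ RW (RA (rest))) = "crop".toList ++ RH (RW (RA (rest))) := by
          simp only [RH]
          exact replace_pass' "{height}".toList "297".toList '{' "height}".toList eH "crop".toList (RW (RA (rest))) (by simp)
        have e4 : RD desc ("crop".toList ++ RH (RW (RA (rest)))) = "crop".toList ++ RD desc (RH (RW (RA (rest)))) := by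
          simp only [RD]
          exact replace_pass' "{description}".toList desc '{' "description}".toList eD "crop".toList (RH (RW (RA (rest)))) (by simp)
        rw [e1, e2, e3, e4, pyScan_action, ih rest hrl]
      · by_cases h2 : "{width}".toList <+: (c :: t)
        · obtain ⟨rest, hrest⟩ := h2
          have hrl : rest.length ≤ n := by
            have := congrArg List.length hrest; simp at this; omega
          rw [← hrest]
          have hnp1 : ¬ "{action}".toList <+: ('{' :: "width}".toList) ++ (rest) := by
            rw [← eW]
            exact not_prefix_of_incomp _ (by decide) (by decide)
          have e1 : RA ("{width}".toList ++ rest) = "{width}".toList ++ RA (rest) := by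
            simp only [RA]
            rw [eW]
            exact pass_tag "{action}".toList "crop".toList '{' "action}".toList eA '{' "width}".toList (rest) (by simp) hnp1
          have e2 : RW ("{width}".toList ++ RA (rest)) = "614".toList ++ RW (RA (rest)) := by
            simp only [RW]
            rw [replace_consume "{width}".toList "614".toList ("{width}".toList ++ RA (rest)) (by decide) (List.prefix_append _ _), List.drop_left]
          have e3 : RH ("614".toList ++ RW (RA (rest))) = "614".toList ++ RH (RW (RA (rest))) := by
            simp only [RH]
            exact replace_pass' "{height}".toList "297".toList '{' "height}".toList eH "614".toList (RW (RA (rest))) (by simp)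
          have e4 : RD desc ("614".toList ++ RH (RW (RA (rest)))) = "614".toList ++ RD desc (RH (RW (RA (rest)))) := by
            simp only [RD]
            exact replace_pass' "{description}".toList desc '{' "description}".toList eD "614".toList (RH (RW (RA (rest)))) (by simp)
          rw [e1, e2, e3, e4, pyScan_width, ih rest hrl]
        · by_cases h3 : "{height}".toList <+: (c :: t)
          · obtain ⟨rest, hrest⟩ := h3
            have hrl : rest.length ≤ n := by
              have := congrArg List.length hrest; simp at this; omega
            rw [← hrest]
            have hnp1 : ¬ "{action}".toList <+: ('{' :: "height}".toList) ++ (rest) := by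
              rw [← eH]
              exact not_prefix_of_incomp _ (by decide) (by decide)
            have e1 : RA ("{height}".toList ++ rest) = "{height}".toList ++ RA (rest) := by
              simp only [RA]
              rw [eH]
              exact pass_tag "{action}".toList "crop".toList '{' "action}".toList eA '{' "height}".toList (rest) (by simp) hnp1
            have hnp2 : ¬ "{width}".toList <+: ('{' :: "height}".toList) ++ (RA (rest)) := by
              rw [← eH]
              exact not_prefix_of_incomp _ (by decide) (by decide)
            have e2 : RW ("{height}".toList ++ RA (rest)) = "{height}".toList ++ RW (RA (rest)) := by
              simp only [RW]
              rw [eH]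
              exact pass_tag "{width}".toList "614".toList '{' "width}".toList eW '{' "height}".toList (RA (rest)) (by simp) hnp2
            have e3 : RH ("{height}".toList ++ RW (RA (rest))) = "297".toList ++ RH (RW (RA (rest))) := by
              simp only [RH]
              rw [replace_consume "{height}".toList "297".toList ("{height}".toList ++ RW (RA (rest))) (by decide) (List.prefix_append _ _), List.drop_left]
            have e4 : RD desc ("297".toList ++ RH (RW (RA (rest)))) = "297".toList ++ RD desc (RH (RW (RA (rest)))) := by
              simp only [RD]
              exact replace_pass' "{description}".toList desc '{' "description}".toList eD "297".toList (RH (RW (RA (rest)))) (by simp)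
            rw [e1, e2, e3, e4, pyScan_height, ih rest hrl]
          · by_cases h4 : "{description}".toList <+: (c :: t)
            · obtain ⟨rest, hrest⟩ := h4
              have hrl : rest.length ≤ n := by
                have := congrArg List.length hrest; simp at this; omega
              rw [← hrest]
              have hnp1 : ¬ "{action}".toList <+: ('{' :: "description}".toList) ++ (rest) := by
                rw [← eD]
                exact not_prefix_of_incomp _ (by decide) (by decide)
              have e1 : RA ("{description}".toList ++ rest) = "{description}".toList ++ RA (rest) := by
                simp only [RA]
                rw [eD]
                exact pass_tag "{action}".toList "crop".toList '{' "action}".toList eA '{' "description}".toList (rest) (by simp) hnp1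
              have hnp2 : ¬ "{width}".toList <+: ('{' :: "description}".toList) ++ (RA (rest)) := by
                rw [← eD]
                exact not_prefix_of_incomp _ (by decide) (by decide)
              have e2 : RW ("{description}".toList ++ RA (rest)) = "{description}".toList ++ RW (RA (rest)) := by
                simp only [RW]
                rw [eD]
                exact pass_tag "{width}".toList "614".toList '{' "width}".toList eW '{' "description}".toList (RA (rest)) (by simp) hnp2
              have hnp3 : ¬ "{height}".toList <+: ('{' :: "description}".toList) ++ (RW (RA (rest))) := by
                rw [← eD]
                exact not_prefix_of_incomp _ (by decide) (by decide)
              have e3 : RH ("{description}".toList ++ RW (RA (rest))) = "{description}".toList ++ RH (RW (RA (rest))) := by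
                simp only [RH]
                rw [eD]
                exact pass_tag "{height}".toList "297".toList '{' "height}".toList eH '{' "description}".toList (RW (RA (rest))) (by simp) hnp3
              have e4 : RD desc ("{description}".toList ++ RH (RW (RA (rest)))) = desc ++ RD desc (RH (RW (RA (rest)))) := by
                simp only [RD]
                rw [replace_consume "{description}".toList desc ("{description}".toList ++ RH (RW (RA (rest)))) (by decide) (List.prefix_append _ _), List.drop_left]
              rw [e1, e2, e3, e4, pyScan_description, ih rest hrl]
            · -- no placeholder at the front: the first char is copied by every pass
              have e1 : RA (c :: t) = c :: RA t := by
                simp only [RA]; exact replace_skip _ _ (by decide) c t h1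
              have hw : ¬ "{width}".toList <+: (c :: RA t) := by
                rw [eW] at h2 ⊢
                simp only [RA]
                exact not_prefix_cons_replace _ _ (by decide) '{' _ misWA c t h2
              have e2 : RW (c :: RA t) = c :: RW (RA t) := by
                simp only [RW]; exact replace_skip _ _ (by decide) _ _ hw
              have hh1 : ¬ "{height}".toList <+: (c :: RA t) := by
                rw [eH] at h3 ⊢
                simp only [RA]
                exact not_prefix_cons_replace _ _ (by decide) '{' _ misHA c t h3
              have hh2 : ¬ "{height}".toList <+: (c :: RW (RA t)) := by
                rw [eH] at hh1 ⊢
                simp only [RW]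
                exact not_prefix_cons_replace _ _ (by decide) '{' _ misHW c (RA t) hh1
              have e3 : RH (c :: RW (RA t)) = c :: RH (RW (RA t)) := by
                simp only [RH]; exact replace_skip _ _ (by decide) _ _ hh2
              have hd1 : ¬ "{description}".toList <+: (c :: RA t) := by
                rw [eD] at h4 ⊢
                simp only [RA]
                exact not_prefix_cons_replace _ _ (by decide) '{' _ misDA c t h4
              have hd2 : ¬ "{description}".toList <+: (c :: RW (RA t)) := by
                rw [eD] at hd1 ⊢
                simp only [RW]
                exact not_prefix_cons_replace _ _ (by decide) '{' _ misDW c (RA t) hd1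
              have hd3 : ¬ "{description}".toList <+: (c :: RH (RW (RA t))) := by
                rw [eD] at hd2 ⊢
                simp only [RH]
                exact not_prefix_cons_replace _ _ (by decide) '{' _ misDH c (RW (RA t)) hd2
              have e4 : RD desc (c :: RH (RW (RA t))) = c :: RD desc (RH (RW (RA t))) := by
                simp only [RD]; exact replace_skip _ _ (by decide) _ _ hd3
              rw [e1, e2, e3, e4, pyScan_cons,
                isPrefixOf_false h1, isPrefixOf_false h2, isPrefixOf_false h3, isPrefixOf_false h4]
              simp only [Bool.false_eq_true, if_false]
              rw [ih t hlt]

-- ===== VERDICT (by name: the statement is the Claim_ definition above) =====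
theorem parse_image_link_spec : Claim_equal_parse_image_link := by
  unfold Claim_equal_parse_image_link
  intro link desc _
  unfold Spec_parse_image_link parse_image_link parse_image_link_alt
  simp only [List.foldl]
  have hmk : ∀ s : String, s = String.ofList s.toList := fun s => by rw [String.ofList_toList]
  rw [hmk (PySem.Str.replace _ _ _), PySem.Str.toList_replace, PySem.Str.toList_replace,
    PySem.Str.toList_replace, PySem.Str.toList_replace]
  exact congrArg String.ofList (by
    have := chain_eq_scan desc.toList link.toList.length link.toList le_rfl
    simpa only [RA, RW, RH, RD] using this)
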